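-- pv_equiv track=rewrite | github.com/xuanmay2701/ppsn | util/ucr_data_loader.py | sort_data_by_error_list
-- ===== SOURCE A (Python) =====
-- def sort_data_by_error_list(data, error_list):
--     error_data = []
--     correct_data = []
--     for i in range(len(error_list)):
--         if error_list[i]:
--             correct_data.append(data[i])
--         else:
--             error_data.append(data[i])
--     new_data = error_data + correct_data
--     if len(error_list) < len(data):
--         for i in range(len(error_list), len(data)):
--             new_data.append(data[i])
--
--     return new_data
-- ===== SOURCE B (Python) =====
-- def sort_data_by_error_list(data, error_list):
--     # Stable sort of indices by flag truthiness: False-flag items first (in order),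
--     # then True-flag items (in order), then the unflagged tail.
--     order = sorted(range(len(error_list)), key=lambda i: bool(error_list[i]))
--     return [data[i] for i in order] + data[len(error_list):]
-- ===== Notes on version B (the rewrite author's own statement) =====
-- stated objective: idiomatic
-- what changed: Replaces the explicit two-accumulator partition loop plus tail-append loop by a stable sort of the flagged indices by flag value followed by one index-map and a slice.
import Mathlib
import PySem

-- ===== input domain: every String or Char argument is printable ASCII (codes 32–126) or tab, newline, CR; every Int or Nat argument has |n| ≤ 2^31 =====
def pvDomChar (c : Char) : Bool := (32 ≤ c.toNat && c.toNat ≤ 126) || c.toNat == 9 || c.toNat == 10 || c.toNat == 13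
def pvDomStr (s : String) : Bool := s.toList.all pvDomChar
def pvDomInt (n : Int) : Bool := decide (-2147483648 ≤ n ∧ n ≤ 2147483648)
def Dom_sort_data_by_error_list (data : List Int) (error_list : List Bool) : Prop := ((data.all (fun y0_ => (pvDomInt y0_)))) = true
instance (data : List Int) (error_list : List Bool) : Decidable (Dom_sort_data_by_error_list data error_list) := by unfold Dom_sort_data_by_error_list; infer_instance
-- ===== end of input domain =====

-- B replaces the explicit partition loop of A by a stable sort of the flagged indices
-- by flag value, an index-map and a slice (objective: idiomatic; return value only).

-- ===== PORT A =====
-- data[i] → pyGetD (in range for every index the loops touch, given Pre_)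
def sort_data_by_error_list (data : List Int) (error_list : List Bool) : List Int :=
  let p := (PySem.List.pyRange 0 error_list.length 1).foldl
    (fun (p : List Int × List Int) i =>
      if PySem.List.pyGetD error_list i false then
        (p.1, p.2 ++ [PySem.List.pyGetD data i 0])
      else
        (p.1 ++ [PySem.List.pyGetD data i 0], p.2)) ([], [])
  let new_data := p.1 ++ p.2
  if (error_list.length : Int) < (data.length : Int) then
    (PySem.List.pyRange error_list.length data.length 1).foldl
      (fun acc i => acc ++ [PySem.List.pyGetD data i 0]) new_data
  else new_data

-- ===== PORT B =====
def sort_data_by_error_list_alt (data : List Int) (error_list : List Bool) : List Int :=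
  let order := PySem.List.sorted (PySem.List.pyRange 0 error_list.length 1)
      (fun i => PySem.List.pyGetD error_list i false)
  order.map (fun i => PySem.List.pyGetD data i 0)
    ++ PySem.List.slice data (some (error_list.length : Int)) none

-- ===== PRECONDITION & SPEC =====
-- Pre_: Python A raises IndexError (data[i]) when error_list is longer than data.
def Pre_sort_data_by_error_list (data : List Int) (error_list : List Bool) : Prop :=
  error_list.length ≤ data.length
instance (data : List Int) (error_list : List Bool) : Decidable (Pre_sort_data_by_error_list data error_list) := by unfold Pre_sort_data_by_error_list; infer_instance

def pvWitness_sort_data_by_error_list : List Int × List Bool := ([5, 1, 7, 3], [true, false, true])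

def Spec_sort_data_by_error_list (data : List Int) (error_list : List Bool) (out : List Int) : Prop := out = sort_data_by_error_list_alt data error_list
instance (data : List Int) (error_list : List Bool) (out : List Int) : Decidable (Spec_sort_data_by_error_list data error_list out) := by unfold Spec_sort_data_by_error_list; infer_instance

-- ===== CLAIM (what is proved, stated in full; the proofs are below) =====
def Claim_equal_sort_data_by_error_list : Prop := ∀ (data : List Int) (error_list : List Bool), Dom_sort_data_by_error_list data error_list → Pre_sort_data_by_error_list data error_list → Spec_sort_data_by_error_list data error_list (sort_data_by_error_list data error_list)

-- ===== LEMMAS AND PROOFS =====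

-- A's partition loop, characterised: the two accumulators collect the filtered maps.
lemma foldl_partition (k : Int → Bool) (g : Int → Int) :
    ∀ (l : List Int) (F T : List Int),
      l.foldl (fun (p : List Int × List Int) i =>
          if k i then (p.1, p.2 ++ [g i]) else (p.1 ++ [g i], p.2)) (F, T)
        = (F ++ (l.filter (fun i => !k i)).map g, T ++ (l.filter k).map g) := by
  intro l
  induction l with
  | nil => simp
  | cons x xs ih =>
    intro F T
    by_cases hx : k x <;> simp [hx, ih]

-- inserting x before the first element of the tail block
lemma insertBy_append_cons {α : Type} (before : α → α → Bool) (x : α) :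
    ∀ (F : List α) (t : α) (T : List α),
      (∀ y ∈ F, before x y = false) → before x t = true →
      PySem.List.insertBy before x (F ++ t :: T) = F ++ x :: t :: T := by
  intro F
  induction F with
  | nil => intro t T _ ht; simp [PySem.List.insertBy, ht]
  | cons f fs ih =>
    intro t T hF ht
    have hf : before x f = false := hF f (by simp)
    simp [PySem.List.insertBy, hf, ih t T (fun y hy => hF y (by simp [hy])) ht]

-- stable insertion sort by a Bool key keeps false-key elements first, each block in order
lemma foldl_insertBy_bool (k : Int → Bool) :
    ∀ (l F T : List Int),
      (∀ y ∈ F, k y = false) → (∀ y ∈ T, k y = true) →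
      l.foldl (fun acc x => PySem.List.insertBy (fun a b => decide (k a < k b)) x acc) (F ++ T)
        = (F ++ l.filter (fun x => !k x)) ++ (T ++ l.filter k) := by
  intro l
  induction l with
  | nil => intro F T _ _; simp
  | cons x xs ih =>
    intro F T hF hT
    by_cases hx : k x
    · have hstep : PySem.List.insertBy (fun a b => decide (k a < k b)) x (F ++ T)
          = (F ++ T) ++ [x] := by
        apply PySem.List.insertBy_of_forall_not_before
        intro y hy
        rcases List.mem_append.mp hy with h | h
        · simp [hx, hF y h]
        · simp [hx, hT y h]
      have := ih F (T ++ [x]) hF (by intro y hy; rcases List.mem_append.mp hy with h | h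
                                     · exact hT y h
                                     · simp at h; simp [h, hx])
      simpa [hstep, hx, List.append_assoc] using this
    · have hx' : k x = false := by simpa using hx
      have hstep : PySem.List.insertBy (fun a b => decide (k a < k b)) x (F ++ T)
          = (F ++ [x]) ++ T := by
        cases T with
        | nil =>
          simpa using PySem.List.insertBy_of_forall_not_before _ x F
            (fun y hy => by simp [hx', hF y hy])
        | cons t ts =>
          have := insertBy_append_cons (fun a b => decide (k a < k b)) x F t ts
            (fun y hy => by simp [hx', hF y hy])
            (by simp [hx', hT t (by simp)])
          simpa [List.append_assoc] using this
      have := ih (F ++ [x]) T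
        (by intro y hy; rcases List.mem_append.mp hy with h | h
            · exact hF y h
            · simp at h; simp [h, hx'])
        hT
      simpa [hstep, hx', List.append_assoc] using this

lemma sorted_bool (l : List Int) (k : Int → Bool) :
    PySem.List.sorted l k = l.filter (fun x => !k x) ++ l.filter k := by
  rw [PySem.List.sorted_eq_foldl_insertBy]
  simpa using foldl_insertBy_bool k l [] [] (by simp) (by simp)

-- A's tail loop appends one element per index
lemma foldl_append_map (g : Int → Int) :
    ∀ (l : List Int) (acc : List Int),
      l.foldl (fun acc i => acc ++ [g i]) acc = acc ++ l.map g := by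
  intro l
  induction l with
  | nil => simp
  | cons x xs ih => intro acc; simp [ih, List.append_assoc]

-- ===== VERDICT (by name: the statement is the Claim_ definition above) =====
theorem sort_data_by_error_list_spec : Claim_equal_sort_data_by_error_list := by
  intro data error_list _ hpre
  unfold Spec_sort_data_by_error_list sort_data_by_error_list sort_data_by_error_list_alt
  have hpart := foldl_partition (fun i => PySem.List.pyGetD error_list i false)
    (fun i => PySem.List.pyGetD data i 0)
    (PySem.List.pyRange 0 error_list.length 1) [] []
  have hsort := sorted_bool (PySem.List.pyRange 0 error_list.length 1)
    (fun i => PySem.List.pyGetD error_list i false)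
  have hslice : PySem.List.slice data (some (error_list.length : Int)) none
      = data.drop error_list.length := PySem.List.slice_from_natCast data error_list.length
  have hdrop : (PySem.List.pyRange (error_list.length : Int) (data.length : Int) 1).map
        (fun i => PySem.List.pyGetD data i 0) = data.drop error_list.length := by
    simpa using PySem.List.map_pyGetD_pyRange' data 0 (a := (error_list.length : Int))
      (by positivity)
  by_cases hlt : (error_list.length : Int) < (data.length : Int)
  · have htail := foldl_append_map (fun i => PySem.List.pyGetD data i 0)
      (PySem.List.pyRange error_list.length data.length 1)
    simp only [hlt, if_pos, hpart, hsort, hslice, htail, hdrop]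
    simp [List.map_append, List.append_assoc]
  · have heq : error_list.length = data.length := le_antisymm hpre (by exact_mod_cast not_lt.mp hlt)
    simp only [hlt, if_neg, hpart, hsort, hslice, not_false_iff]
    simp [List.map_append, heq]
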